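-- pv_equiv track=rewrite | github.com/brandonFoundery/ByteForge | Requirements_Generation_System/orchestrator.py | _repair_multiple_yaml_blocks
-- ===== SOURCE A (Python) =====
-- def _repair_multiple_yaml_blocks(content: str) -> str:
--     """Fix multiple YAML frontmatter blocks"""
--     # Remove extra --- markers at the beginning
--     lines = content.split('\n')
--     cleaned_lines = []
--     yaml_start_found = False
--     yaml_end_found = False
--
--     for line in lines:
--         if line.strip() == '---':
--             if not yaml_start_found:
--                 cleaned_lines.append(line)
--                 yaml_start_found = True
--             elif not yaml_end_found:
--                 cleaned_lines.append(line)
--                 yaml_end_found = True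
--             # Skip additional --- markers
--         else:
--             cleaned_lines.append(line)
--
--     return '\n'.join(cleaned_lines)
-- ===== SOURCE B (Python) =====
-- def _repair_multiple_yaml_blocks(content: str) -> str:
--     """Fix multiple YAML frontmatter blocks"""
--     lines = content.split('\n')
--     marker_indices = [i for i, line in enumerate(lines) if line.strip() == '---']
--     drop = set(marker_indices[2:])
--     return '\n'.join(line for i, line in enumerate(lines) if i not in drop)
-- ===== Notes on version B (the rewrite author's own statement) =====
-- stated objective: alternative
-- what changed: Replaces the single pass with two running boolean flags by a two-pass decomposition: first collect the indices of all '---' marker lines, then rebuild the output dropping exactly the marker indices beyond the first two (a precomputed set of positions).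
import Mathlib
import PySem

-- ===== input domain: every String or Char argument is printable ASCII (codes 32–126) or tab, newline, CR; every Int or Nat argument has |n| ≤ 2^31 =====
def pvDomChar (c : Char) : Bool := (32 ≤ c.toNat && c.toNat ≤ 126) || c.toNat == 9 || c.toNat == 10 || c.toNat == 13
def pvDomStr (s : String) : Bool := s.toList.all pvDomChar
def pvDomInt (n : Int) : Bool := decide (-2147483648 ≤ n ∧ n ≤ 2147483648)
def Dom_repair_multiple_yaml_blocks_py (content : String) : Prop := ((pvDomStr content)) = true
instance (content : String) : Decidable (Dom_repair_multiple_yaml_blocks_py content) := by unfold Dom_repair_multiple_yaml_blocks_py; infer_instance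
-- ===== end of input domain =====

-- B replaces A's one-pass loop with two flags by a two-pass decomposition (collect marker
-- indices, drop those beyond the first two); alternative structure, same cost.


-- ===== PORT A =====
-- the for-loop over lines with the two flags, appending conditionally
def pvALoop : List String → Bool → Bool → List String
  | [], _, _ => []
  | l :: ls, ys, ye =>
    if PySem.Str.strip l == "---" then
      if !ys then l :: pvALoop ls true ye
      else if !ye then l :: pvALoop ls ys true
      else pvALoop ls ys ye
    else l :: pvALoop ls ys ye

def repair_multiple_yaml_blocks_py (content : String) : String :=
  PySem.Str.join "\n" (pvALoop ((PySem.Str.split? content "\n").getD []) false false)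

-- ===== PORT B =====
def repair_multiple_yaml_blocks_py_alt (content : String) : String :=
  let lines := (PySem.Str.split? content "\n").getD []
  let markerIndices := ((PySem.List.enumerate lines 0).filter
      (fun p => PySem.Str.strip p.2 == "---")).map (·.1)
  let drop : PySem.Set Int := PySem.Set.ofList (PySem.List.slice markerIndices (some 2) none)
  PySem.Str.join "\n" (((PySem.List.enumerate lines 0).filter
      (fun p => !(PySem.Set.contains drop p.1))).map (·.2))

-- ===== PRECONDITION & SPEC =====
def Spec_repair_multiple_yaml_blocks_py (content : String) (out : String) : Prop := out = repair_multiple_yaml_blocks_py_alt content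
instance (content : String) (out : String) : Decidable (Spec_repair_multiple_yaml_blocks_py content out) := by unfold Spec_repair_multiple_yaml_blocks_py; infer_instance

-- ===== CLAIM (what is proved, stated in full; the proofs are below) =====
def Claim_equal_repair_multiple_yaml_blocks_py : Prop := ∀ (content : String), Dom_repair_multiple_yaml_blocks_py content → Spec_repair_multiple_yaml_blocks_py content (repair_multiple_yaml_blocks_py content)

-- ===== LEMMAS AND PROOFS =====

-- middle form of the kept-lines computation: m = remaining number of markers to keep
def pvKeep : List String → Nat → List String
  | [], _ => []
  | l :: ls, m =>
    if PySem.Str.strip l == "---" then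
      if 0 < m then l :: pvKeep ls (m - 1) else pvKeep ls 0
    else l :: pvKeep ls m

-- marker indices of ls where enumeration starts at n
def pvMarks (ls : List String) (n : Int) : List Int :=
  ((PySem.List.enumerate ls n).filter (fun p => PySem.Str.strip p.2 == "---")).map (·.1)

theorem pvMarks_cons (l : String) (ls : List String) (n : Int) :
    pvMarks (l :: ls) n =
      if PySem.Str.strip l == "---" then n :: pvMarks ls (n + 1) else pvMarks ls (n + 1) := by
  simp only [pvMarks, PySem.List.enumerate_cons, List.filter_cons]
  split_ifs <;> simp

theorem pvMarks_ge (ls : List String) : ∀ (n x : Int), x ∈ pvMarks ls n → n ≤ x := by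
  induction ls with
  | nil => intro n x hx; simp [pvMarks] at hx
  | cons l ls ih =>
    intro n x hx
    rw [pvMarks_cons] at hx
    split_ifs at hx with h
    · rcases List.mem_cons.mp hx with rfl | hx
      · exact le_refl _
      · exact le_trans (by omega) (ih _ _ hx)
    · exact le_trans (by omega) (ih _ _ hx)

theorem pvALoop_eq_pvKeep (ls : List String) :
    pvALoop ls false false = pvKeep ls 2 ∧ pvALoop ls true false = pvKeep ls 1 ∧
      pvALoop ls true true = pvKeep ls 0 := by
  induction ls with
  | nil => simp [pvALoop, pvKeep]
  | cons l ls ih =>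
    obtain ⟨h2, h1, h0⟩ := ih
    by_cases h : PySem.Str.strip l == "---" <;>
      simp [pvALoop, pvKeep, h, h2, h1, h0]

theorem pvFilter_eq_pvKeep (ls : List String) :
    ∀ (n : Int) (m : Nat) (D : PySem.Set Int),
      (∀ x : Int, n ≤ x → (PySem.Set.contains D x = true ↔ x ∈ (pvMarks ls n).drop m)) →
      ((PySem.List.enumerate ls n).filter (fun p => !(PySem.Set.contains D p.1))).map (·.2)
        = pvKeep ls m := by
  induction ls with
  | nil => intro n m D _; simp [PySem.List.enumerate_nil, pvKeep]
  | cons l ls ih =>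
    intro n m D hD
    rw [PySem.List.enumerate_cons, List.filter_cons]
    by_cases h : PySem.Str.strip l == "---"
    · cases m with
      | zero =>
        have hn : PySem.Set.contains D n = true := by
          rw [hD n (le_refl n)]
          rw [pvMarks_cons]
          simp [h]
        simp only [hn, Bool.not_true, Bool.false_eq_true, if_false]
        rw [ih (n + 1) 0 D]
        · simp [pvKeep, h]
        · intro x hx
          rw [hD x (by omega), pvMarks_cons]
          simp only [h, if_pos, List.drop_zero, List.mem_cons]
          constructor
          · rintro (rfl | hmem)
            · omega
            · exact hmem
          · exact Or.inr
      | succ m' =>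
        have hn : PySem.Set.contains D n = false := by
          rw [Bool.eq_false_iff]
          intro hc
          have := (hD n (le_refl n)).mp hc
          rw [pvMarks_cons] at this
          simp only [h, if_pos, List.drop_succ_cons] at this
          have := pvMarks_ge ls (n + 1) n (List.mem_of_mem_drop this)
          omega
        simp only [hn, Bool.not_false, if_pos, List.map_cons]
        rw [ih (n + 1) m' D]
        · simp [pvKeep, h]
        · intro x hx
          rw [hD x (by omega), pvMarks_cons]
          simp [h]
    · have hn : PySem.Set.contains D n = false := by
        rw [Bool.eq_false_iff]
        intro hc
        have := (hD n (le_refl n)).mp hc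
        rw [pvMarks_cons] at this
        simp only [h, Bool.false_eq_true, if_false] at this
        have := pvMarks_ge ls (n + 1) n (List.mem_of_mem_drop this)
        omega
      simp only [hn, Bool.not_false, if_pos, List.map_cons]
      rw [ih (n + 1) m D]
      · simp [pvKeep, h]
      · intro x hx
        rw [hD x (by omega), pvMarks_cons]
        simp [h]

-- ===== VERDICT (by name: the statement is the Claim_ definition above) =====
theorem repair_multiple_yaml_blocks_py_spec : Claim_equal_repair_multiple_yaml_blocks_py := by
  intro content _
  unfold Spec_repair_multiple_yaml_blocks_py
  simp only [repair_multiple_yaml_blocks_py, repair_multiple_yaml_blocks_py_alt]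
  generalize (PySem.Str.split? content "\n").getD [] = lines
  have hslice : PySem.List.slice
      (((PySem.List.enumerate lines 0).filter (fun p => PySem.Str.strip p.2 == "---")).map (·.1))
      (some 2) none = (pvMarks lines 0).drop 2 := by
    rw [PySem.List.slice_from _ (by norm_num)]
    rfl
  have hD : ∀ x : Int, (0 : Int) ≤ x →
      (PySem.Set.contains (PySem.Set.ofList ((pvMarks lines 0).drop 2)) x = true ↔
        x ∈ (pvMarks lines 0).drop 2) := by
    intro x _
    rw [PySem.Set.contains_iff, PySem.Set.mem_ofList]
  have hB := pvFilter_eq_pvKeep lines 0 2 (PySem.Set.ofList ((pvMarks lines 0).drop 2)) hD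
  have hA := (pvALoop_eq_pvKeep lines).1
  rw [hslice, hB, hA]
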